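-- pv_equiv track=rewrite | github.com/pypi-data/pypi-mirror-52 | packages/dsa/dsa-13.1.0.tar.gz/dsa-13.1.0/dsa/da/util_feature.py | col_remove_fuzzy
-- ===== SOURCE A (Python) =====
-- def col_remove_fuzzy(cols, colsremove):
--     # cols = list(df1.columns)
--     """
--     :param cols:
--     :param colsremove:
--     :return:
--
--       Remove column from Fuzzy matching.
--     """
--     cols3 = []
--     for t in cols:
--         flag = 0
--         for x in colsremove:
--             if x in t:
--                 flag = 1
--                 break
--         if flag == 0:
--             cols3.append(t)
--     return cols3
-- ===== SOURCE B (Python) =====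
-- def col_remove_fuzzy(cols, colsremove):
--     """Pattern-major re-implementation: successively filter out, one pattern
--     at a time, every column that pattern occurs in; the survivors remain."""
--     cols3 = cols
--     for x in colsremove:
--         cols3 = [t for t in cols3 if x not in t]
--     return cols3
-- ===== Notes on version B (the rewrite author's own statement) =====
-- stated objective: alternative
-- what changed: B transposes A's loops: instead of testing every pattern per column with a flag and break, it filters the column list once per pattern, successively discarding every column that pattern occurs in.
import Mathlib
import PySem

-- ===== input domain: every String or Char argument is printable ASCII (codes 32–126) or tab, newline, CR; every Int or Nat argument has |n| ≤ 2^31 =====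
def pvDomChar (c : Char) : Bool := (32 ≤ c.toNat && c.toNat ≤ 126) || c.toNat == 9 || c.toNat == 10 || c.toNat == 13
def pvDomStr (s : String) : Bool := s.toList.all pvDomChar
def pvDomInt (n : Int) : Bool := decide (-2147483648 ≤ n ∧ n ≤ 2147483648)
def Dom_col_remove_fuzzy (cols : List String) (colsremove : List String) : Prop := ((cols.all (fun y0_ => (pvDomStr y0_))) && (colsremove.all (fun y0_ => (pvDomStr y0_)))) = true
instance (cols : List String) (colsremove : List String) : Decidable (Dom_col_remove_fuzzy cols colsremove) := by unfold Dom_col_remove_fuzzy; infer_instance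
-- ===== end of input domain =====

-- B transposes A's loops: it filters the column list once per pattern instead of scanning the
-- patterns per column; objective: alternative (different traversal, same cost).

-- ===== PORT A =====
-- inner 'for x in colsremove: if x in t: flag = 1; break' loop, returning the final flag
def pvInnerFlag (colsremove : List String) (t : String) : Nat :=
  match colsremove with
  | [] => 0
  | x :: xs => if PySem.Str.isIn x t then 1 else pvInnerFlag xs t

def col_remove_fuzzy (cols : List String) (colsremove : List String) : List String :=
  cols.foldl (fun cols3 t => if pvInnerFlag colsremove t == 0 then cols3 ++ [t] else cols3) []

-- ===== PORT B =====
-- 'cols3 = cols; for x in colsremove: cols3 = [t for t in cols3 if x not in t]'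
def col_remove_fuzzy_alt (cols : List String) (colsremove : List String) : List String :=
  colsremove.foldl (fun cols3 x => cols3.filter (fun t => ! PySem.Str.isIn x t)) cols

-- ===== PRECONDITION & SPEC =====
def Spec_col_remove_fuzzy (cols : List String) (colsremove : List String) (out : List String) : Prop := out = col_remove_fuzzy_alt cols colsremove
instance (cols : List String) (colsremove : List String) (out : List String) : Decidable (Spec_col_remove_fuzzy cols colsremove out) := by unfold Spec_col_remove_fuzzy; infer_instance

-- ===== CLAIM (what is proved, stated in full; the proofs are below) =====
def Claim_equal_col_remove_fuzzy : Prop := ∀ (cols : List String) (colsremove : List String), Dom_col_remove_fuzzy cols colsremove → Spec_col_remove_fuzzy cols colsremove (col_remove_fuzzy cols colsremove)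

-- ===== LEMMAS AND PROOFS =====

-- successive per-pattern filtering is one filter by A's flag being 0
theorem pvFoldlFilter_eq (rm : List String) (cols : List String) :
    rm.foldl (fun cols3 x => cols3.filter (fun t => ! PySem.Str.isIn x t)) cols
      = cols.filter (fun t => pvInnerFlag rm t == 0) := by
  induction rm generalizing cols with
  | nil => simp [pvInnerFlag]
  | cons x xs ih =>
    rw [List.foldl_cons, ih, List.filter_filter]
    apply List.filter_congr
    intro t _
    rcases h : PySem.Chars.isIn x.toList t.toList with _ | _
    · simp [pvInnerFlag, PySem.Str.isIn_eq, h]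
    · simp [pvInnerFlag, PySem.Str.isIn_eq, h]

-- ===== VERDICT (by name: the statement is the Claim_ definition above) =====
theorem col_remove_fuzzy_spec : Claim_equal_col_remove_fuzzy := by
  intro cols colsremove _
  show col_remove_fuzzy cols colsremove = col_remove_fuzzy_alt cols colsremove
  unfold col_remove_fuzzy col_remove_fuzzy_alt
  have h := PySem.List.foldl_append_if (fun t => pvInnerFlag colsremove t == 0) id cols []
  simp only [id_eq, List.map_id, List.nil_append] at h
  rw [h, pvFoldlFilter_eq]
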